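-- pv_equiv track=rewrite | github.com/Levi1C/ProjectEuler | problem_functions.py | triangle_numbers
-- ===== SOURCE A (Python) =====
-- def triangle_numbers(limit):
--     triang_nums = []
--     i = 1
--     number = i
--     while number < limit:
--         triang_nums.append(number)
--         i += 1
--         number += i
--     return triang_nums
-- ===== SOURCE B (Python) =====
-- def triangle_numbers(limit):
--     k = 0
--     while (k + 1) * (k + 2) // 2 < limit:
--         k += 1
--     return [n * (n + 1) // 2 for n in range(1, k + 1)]
-- ===== Notes on version B (the rewrite author's own statement) =====
-- stated objective: alternative
-- what changed: B keeps no running-sum accumulator: it first counts how many triangle numbers lie below the limit and then builds the list by evaluating the closed triangle-number formula over the index range.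
import Mathlib
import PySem

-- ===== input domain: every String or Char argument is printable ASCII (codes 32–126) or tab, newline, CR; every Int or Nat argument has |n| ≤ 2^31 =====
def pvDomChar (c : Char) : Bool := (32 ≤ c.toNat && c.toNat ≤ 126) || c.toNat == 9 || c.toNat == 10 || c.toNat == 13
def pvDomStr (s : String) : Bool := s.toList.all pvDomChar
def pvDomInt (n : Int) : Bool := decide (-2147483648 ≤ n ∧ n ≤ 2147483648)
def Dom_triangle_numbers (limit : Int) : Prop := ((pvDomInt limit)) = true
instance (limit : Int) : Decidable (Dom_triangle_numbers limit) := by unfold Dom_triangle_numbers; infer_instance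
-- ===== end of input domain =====

-- B replaces A's running-sum accumulator by counting the triangle numbers below the limit
-- and emitting each one with the closed form n*(n+1)//2 (objective: alternative decomposition).

-- ===== PORT A =====
-- 'i' only ever takes the values 1,2,3,…, so it is carried as a Nat.
def triangle_numbers_go (limit : Int) (i : Nat) (number : Int) (acc : List Int) : List Int :=
  if number < limit then
    triangle_numbers_go limit (i + 1) (number + ((i : Int) + 1)) (acc ++ [number])
  else acc
termination_by (limit - number).toNat
decreasing_by omega

def triangle_numbers (limit : Int) : List Int :=
  triangle_numbers_go limit 1 1 []

-- ===== PORT B =====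
-- lower bound on the loop test's left side, used only for termination of the counting loop
lemma tri_lb (k : Nat) : (k : Int) + 1 ≤ PySem.Int.floordiv (((k : Int) + 1) * ((k : Int) + 2)) 2 := by
  rw [PySem.Int.le_floordiv_iff_mul_le (by norm_num)]
  nlinarith [Int.natCast_nonneg k]

-- 'k = 0; while (k+1)*(k+2)//2 < limit: k += 1'
def triangle_numbers_count (limit : Int) (k : Nat) : Nat :=
  if PySem.Int.floordiv (((k : Int) + 1) * ((k : Int) + 2)) 2 < limit then
    triangle_numbers_count limit (k + 1)
  else k
termination_by limit.toNat - k
decreasing_by have := tri_lb k; omega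

-- '[n * (n + 1) // 2 for n in range(1, k + 1)]'
def triangle_numbers_alt (limit : Int) : List Int :=
  (PySem.List.pyRange 1 ((triangle_numbers_count limit 0 : Int) + 1) 1).map
    (fun n => PySem.Int.floordiv (n * (n + 1)) 2)

-- ===== PRECONDITION & SPEC =====
def Spec_triangle_numbers (limit : Int) (out : List Int) : Prop := out = triangle_numbers_alt limit
instance (limit : Int) (out : List Int) : Decidable (Spec_triangle_numbers limit out) := by unfold Spec_triangle_numbers; infer_instance

-- ===== CLAIM (what is proved, stated in full; the proofs are below) =====
def Claim_equal_triangle_numbers : Prop := ∀ (limit : Int), Dom_triangle_numbers limit → Spec_triangle_numbers limit (triangle_numbers limit)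

-- ===== LEMMAS AND PROOFS =====

-- the n-th triangle number, in the form both ports compute it
def triNum (n : Nat) : Int := PySem.Int.floordiv ((n : Int) * ((n : Int) + 1)) 2

lemma fd2 (m : Int) : PySem.Int.floordiv (2 * m) 2 = m := by
  rw [PySem.Int.floordiv_eq_ediv_of_pos (by norm_num)]
  exact Int.mul_ediv_cancel_left m (by norm_num)

lemma triNum_succ (n : Nat) : triNum (n + 1) = triNum n + ((n : Int) + 1) := by
  obtain ⟨m, hm⟩ := Int.even_mul_succ_self (n : Int)
  have h1 : (n : Int) * ((n : Int) + 1) = 2 * m := by omega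
  have h2 : ((n + 1 : Nat) : Int) * (((n + 1 : Nat) : Int) + 1) = 2 * (m + (n : Int) + 1) := by
    push_cast; nlinarith
  unfold triNum
  rw [h1, h2, fd2, fd2]; omega

lemma triNum_one : triNum 1 = 1 := by decide

lemma count_upper (limit : Int) (k : Nat) :
    ¬ triNum (triangle_numbers_count limit k + 1) < limit := by
  induction k using triangle_numbers_count.induct limit with
  | case1 k h ih => rw [triangle_numbers_count, if_pos h]; exact ih
  | case2 k h =>
    rw [triangle_numbers_count, if_neg h]
    intro hc
    exact h (by unfold triNum at hc; push_cast at hc ⊢; exact hc)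

lemma count_lower (limit : Int) (k : Nat) :
    ∀ j, k < j → j ≤ triangle_numbers_count limit k → triNum j < limit := by
  induction k using triangle_numbers_count.induct limit with
  | case1 k h ih =>
    intro j hj1 hj2
    rw [triangle_numbers_count, if_pos h] at hj2
    rcases Nat.lt_or_ge (k + 1) j with h' | h'
    · exact ih j h' hj2
    · have : j = k + 1 := by omega
      subst this
      unfold triNum; push_cast; exact h
  | case2 k h =>
    intro j hj1 hj2
    rw [triangle_numbers_count, if_neg h] at hj2
    omega

lemma go_eq (limit : Int) :
    ∀ (n i : Nat) (acc : List Int), 1 ≤ i → i + n = triangle_numbers_count limit 0 + 1 →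
      triangle_numbers_go limit i (triNum i) acc = acc ++ (List.range' i n).map triNum := by
  intro n
  induction n with
  | zero =>
    intro i acc h1 h2
    have : i = triangle_numbers_count limit 0 + 1 := by omega
    rw [triangle_numbers_go, if_neg (by rw [this]; exact count_upper limit 0)]
    simp
  | succ n ih =>
    intro i acc h1 h2
    have hlt : triNum i < limit := count_lower limit 0 i (by omega) (by omega)
    rw [triangle_numbers_go, if_pos hlt]
    have hs : triNum i + ((i : Int) + 1) = triNum (i + 1) := by rw [triNum_succ]
    rw [hs, ih (i + 1) (acc ++ [triNum i]) (by omega) (by omega)]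
    rw [List.range'_succ]
    simp

lemma alt_eq (limit : Int) :
    triangle_numbers_alt limit =
      (List.range' 1 (triangle_numbers_count limit 0)).map triNum := by
  unfold triangle_numbers_alt
  rw [PySem.List.pyRange_one]
  have h1 : (((triangle_numbers_count limit 0 : Int) + 1) - 1).toNat = triangle_numbers_count limit 0 := by omega
  rw [h1, List.range'_eq_map_range]
  simp only [List.map_map]
  refine List.map_congr_left (fun k _ => ?_)
  unfold triNum
  simp only [Function.comp_apply]
  push_cast
  ring_nf

-- ===== VERDICT (by name: the statement is the Claim_ definition above) =====
theorem triangle_numbers_spec : Claim_equal_triangle_numbers := by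
  intro limit _
  unfold Spec_triangle_numbers triangle_numbers
  rw [alt_eq]
  have := go_eq limit (triangle_numbers_count limit 0) 1 [] (by omega) (by omega)
  rw [triNum_one] at this
  simpa using this
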